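-- pv_equiv track=rewrite | github.com/NVlabs/CraftRTL | correct-by-construction/boolean_logic/utils.py | print_table_minterms
-- ===== SOURCE A (Python) =====
-- def convert_single_term(term, symbols):
--     binary_string = bin(term)[2:]
--     bit_sequence = [int(bit) for bit in binary_string]
--     if len(bit_sequence) < len(symbols):
--         return [0] * (len(symbols)-len(bit_sequence)) + bit_sequence
--     return bit_sequence
--
-- def format_line(items):
--     return " | ".join([str(i) for i in items])
--
-- def print_table_minterms(terms, no_care, symbols, no_care_symbol='x', comment=False):
--     if comment:
--         comment_string = "//"
--     else:
--         comment_string = ""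
--
--     all_lines = [ comment_string + " " + format_line(symbols + ['f'])]
--
--     all_terms = 2**len(symbols)
--     for i in range(all_terms):
--         if i in terms:
--             all_lines.append( comment_string + " " + format_line(convert_single_term(i, symbols) + [1] ) )
--         elif i in no_care:
--             all_lines.append( comment_string + " " + format_line(convert_single_term(i, symbols) + [no_care_symbol] ) )
--         else:
--             all_lines.append( comment_string + " " + format_line(convert_single_term(i, symbols) + [0]  ))
--     return "\n".join(all_lines)
-- ===== SOURCE B (Python) =====
-- def print_table_minterms(terms, no_care, symbols, no_care_symbol='x', comment=False):
--     c = "//" if comment else ""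
--     # one value map, built once: no_care first, terms last so terms win on overlap
--     value = {}
--     for t in no_care:
--         value[t] = no_care_symbol
--     for t in terms:
--         value[t] = "1"
--
--     def rows(bits, idx, remaining):
--         # divide and conquer on the variables: left subtree fixes the next bit to 0,
--         # right subtree to 1; idx tracks the minterm index of the path so far
--         if remaining == 0:
--             return [c + " " + " | ".join(bits + [value.get(idx, "0")])]
--         return rows(bits + ["0"], 2 * idx, remaining - 1) + \
--                rows(bits + ["1"], 2 * idx + 1, remaining - 1)
--
--     lines = [c + " " + " | ".join(list(symbols) + ["f"])] + rows([], 0, len(symbols))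
--     return "\n".join(lines)
-- ===== Notes on version B (the rewrite author's own statement) =====
-- stated objective: alternative
-- what changed: Replaces A's index loop with per-row membership scans and int-to-binary conversion by a recursive divide-and-conquer over the variables (left subtree fixes the next bit to 0, right to 1) that never converts an index to binary, plus a value dict built once (no_care first, terms last so they override like A's elif).
-- intended difference: When symbols is empty, A prints a spurious lone '0' bit column before the f value (an artifact of bin(0) being '0' with no symbols to pad against), e.g. ' f\n 0 | 1'; B prints just the f column, ' f\n 1', which is the intended zero-variable table. — e.g. on print_table_minterms([0], [], [], "x", false): A returns " f\n 0 | 1", B returns " f\n 1"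
import Mathlib
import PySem

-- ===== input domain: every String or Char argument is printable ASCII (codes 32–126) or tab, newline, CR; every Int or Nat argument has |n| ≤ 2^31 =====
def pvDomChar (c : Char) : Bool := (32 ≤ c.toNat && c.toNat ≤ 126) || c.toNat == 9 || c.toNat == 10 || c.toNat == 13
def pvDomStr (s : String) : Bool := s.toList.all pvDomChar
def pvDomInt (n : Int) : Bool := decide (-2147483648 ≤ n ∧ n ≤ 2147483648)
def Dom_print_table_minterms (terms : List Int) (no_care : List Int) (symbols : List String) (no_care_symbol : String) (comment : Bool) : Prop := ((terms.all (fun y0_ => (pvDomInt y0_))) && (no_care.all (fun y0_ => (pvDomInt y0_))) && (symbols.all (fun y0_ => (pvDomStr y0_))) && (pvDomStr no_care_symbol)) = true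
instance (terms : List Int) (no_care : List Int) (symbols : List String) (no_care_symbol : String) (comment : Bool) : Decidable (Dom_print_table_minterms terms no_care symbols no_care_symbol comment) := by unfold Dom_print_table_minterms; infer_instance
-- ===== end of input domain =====

-- B enumerates the rows by a recursive divide-and-conquer over the variables (left subtree bit 0,
-- right subtree bit 1), never converting an index to binary, with a value dict built once
-- (terms written after no_care so they override like A's elif); objective: alternative.

-- binary digits of a Nat, MSB first, empty for 0 (the digit part of Python's bin(n) for n > 0)
def binChars : Nat → List Char
  | 0 => []
  | n+1 => binChars ((n+1)/2) ++ [if (n+1) % 2 = 1 then '1' else '0']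
decreasing_by exact Nat.div_lt_self (Nat.succ_pos n) (by omega)

-- bin(n)[2:] for n ≥ 0: "0" for 0, else the digits
def pyBinNat (n : Nat) : List Char := if n = 0 then ['0'] else binChars n

-- ===== PORT A =====
-- bin(term)[2:] then [int(bit) for bit ...]; term is always a loop index ≥ 0 here, so .toNat is exact
def convert_single_term (term : Int) (symbols : List String) : List Int :=
  let bit_sequence : List Int := (pyBinNat term.toNat).map (fun c => ((c.toNat : Int) - 48))
  if bit_sequence.length < symbols.length then
    List.replicate (symbols.length - bit_sequence.length) (0 : Int) ++ bit_sequence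
  else bit_sequence

-- " | ".join([str(i) for i in items]); Python's list is heterogeneous, so str is applied at each call site
def format_line (items : List String) : String := PySem.Str.join " | " items

def print_table_minterms (terms : List Int) (no_care : List Int) (symbols : List String) (no_care_symbol : String) (comment : Bool) : String :=
  let comment_string := if comment then "//" else ""
  let all_lines : List String := [comment_string ++ " " ++ format_line (symbols ++ ["f"])]
  let all_terms : Int := (2 : Int) ^ symbols.length
  let all_lines := (PySem.List.pyRange 0 all_terms 1).foldl (fun acc i =>
    if i ∈ terms then
      acc ++ [comment_string ++ " " ++ format_line ((convert_single_term i symbols).map PySem.Int.toStr ++ ["1"])]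
    else if i ∈ no_care then
      acc ++ [comment_string ++ " " ++ format_line ((convert_single_term i symbols).map PySem.Int.toStr ++ [no_care_symbol])]
    else
      acc ++ [comment_string ++ " " ++ format_line ((convert_single_term i symbols).map PySem.Int.toStr ++ ["0"])]) all_lines
  PySem.Str.join "\n" all_lines

-- ===== PORT B =====
-- rows(bits, idx, remaining): leaf emits one line, inner node recurses with bit 0 then bit 1
def rowsB (c : String) (value : PySem.Dict Int String) (bits : List String) (idx : Int) : Nat → List String
  | 0 => [c ++ " " ++ PySem.Str.join " | " (bits ++ [value.getD idx "0"])]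
  | r+1 => rowsB c value (bits ++ ["0"]) (2*idx) r ++ rowsB c value (bits ++ ["1"]) (2*idx+1) r

def print_table_minterms_alt (terms : List Int) (no_care : List Int) (symbols : List String) (no_care_symbol : String) (comment : Bool) : String :=
  let c := if comment then "//" else ""
  let value : PySem.Dict Int String :=
    terms.foldl (fun d t => d.insert t "1")
      (no_care.foldl (fun d t => d.insert t no_care_symbol) PySem.Dict.empty)
  PySem.Str.join "\n"
    ([c ++ " " ++ PySem.Str.join " | " (symbols ++ ["f"])] ++ rowsB c value [] 0 symbols.length)

-- ===== PRECONDITION & SPEC =====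
-- When symbols is empty, A prints a spurious lone '0' bit column before the f value (artifact of
-- bin(0) = '0' with no symbols to pad against); B prints just the f column, the intended
-- zero-variable table.
def D_print_table_minterms (terms : List Int) (no_care : List Int) (symbols : List String) (no_care_symbol : String) (comment : Bool) : Prop := symbols = []
instance (terms : List Int) (no_care : List Int) (symbols : List String) (no_care_symbol : String) (comment : Bool) : Decidable (D_print_table_minterms terms no_care symbols no_care_symbol comment) := by unfold D_print_table_minterms; infer_instance

def Spec_print_table_minterms (terms : List Int) (no_care : List Int) (symbols : List String) (no_care_symbol : String) (comment : Bool) (out : String) : Prop := ¬ D_print_table_minterms terms no_care symbols no_care_symbol comment → out = print_table_minterms_alt terms no_care symbols no_care_symbol comment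
instance (terms : List Int) (no_care : List Int) (symbols : List String) (no_care_symbol : String) (comment : Bool) (out : String) : Decidable (Spec_print_table_minterms terms no_care symbols no_care_symbol comment out) := by unfold Spec_print_table_minterms; infer_instance

def pvDiffWitness_print_table_minterms : List Int × List Int × List String × String × Bool := ([0], [], [], "x", false)
def pvDiffWitnessOut_print_table_minterms : String × String := (" f\n 0 | 1", " f\n 1")

-- ===== CLAIM (what is proved, stated in full; the proofs are below) =====
def Claim_unchanged_print_table_minterms : Prop := ∀ (terms : List Int) (no_care : List Int) (symbols : List String) (no_care_symbol : String) (comment : Bool), Dom_print_table_minterms terms no_care symbols no_care_symbol comment → Spec_print_table_minterms terms no_care symbols no_care_symbol comment (print_table_minterms terms no_care symbols no_care_symbol comment)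
def Claim_changed_print_table_minterms : Prop := Dom_print_table_minterms (pvDiffWitness_print_table_minterms.1) (pvDiffWitness_print_table_minterms.2.1) (pvDiffWitness_print_table_minterms.2.2.1) (pvDiffWitness_print_table_minterms.2.2.2.1) (pvDiffWitness_print_table_minterms.2.2.2.2) ∧ D_print_table_minterms (pvDiffWitness_print_table_minterms.1) (pvDiffWitness_print_table_minterms.2.1) (pvDiffWitness_print_table_minterms.2.2.1) (pvDiffWitness_print_table_minterms.2.2.2.1) (pvDiffWitness_print_table_minterms.2.2.2.2) ∧ print_table_minterms (pvDiffWitness_print_table_minterms.1) (pvDiffWitness_print_table_minterms.2.1) (pvDiffWitness_print_table_minterms.2.2.1) (pvDiffWitness_print_table_minterms.2.2.2.1) (pvDiffWitness_print_table_minterms.2.2.2.2) = pvDiffWitnessOut_print_table_minterms.1 ∧ print_table_minterms_alt (pvDiffWitness_print_table_minterms.1) (pvDiffWitness_print_table_minterms.2.1) (pvDiffWitness_print_table_minterms.2.2.1) (pvDiffWitness_print_table_minterms.2.2.2.1) (pvDiffWitness_print_table_minterms.2.2.2.2) = pvDiffWitnessOut_print_table_minterms.2 ∧ pvDiffWitnessOut_print_table_minterms.1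 ≠ pvDiffWitnessOut_print_table_minterms.2
def Claim_exact_print_table_minterms : Prop := ∀ (terms : List Int) (no_care : List Int) (symbols : List String) (no_care_symbol : String) (comment : Bool), Dom_print_table_minterms terms no_care symbols no_care_symbol comment → D_print_table_minterms terms no_care symbols no_care_symbol comment → print_table_minterms terms no_care symbols no_care_symbol comment ≠ print_table_minterms_alt terms no_care symbols no_care_symbol comment

-- ===== LEMMAS AND PROOFS =====

-- getD after a fold of constant-value inserts: membership decides the value
theorem getD_foldl_insert_const (ts : List Int) (d : PySem.Dict Int String) (v dflt : String) (k : Int) :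
    (ts.foldl (fun d t => d.insert t v) d).getD k dflt = if k ∈ ts then v else d.getD k dflt := by
  induction ts generalizing d with
  | nil => simp
  | cons t ts ih =>
    simp only [List.foldl_cons, ih, List.mem_cons]
    by_cases hts : k ∈ ts
    · simp [hts]
    · by_cases hkt : k = t
      · simp [hkt, PySem.Dict.getD_insert_self]
      · simp [hkt, hts, PySem.Dict.getD_insert_of_ne]

theorem mem_binChars (m : Nat) : ∀ c ∈ binChars m, c = '0' ∨ c = '1' := by
  induction m using Nat.strong_induction_on with
  | _ m ih =>
    match m with
    | 0 => simp [binChars]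
    | n+1 =>
      rw [binChars]
      intro c hc
      rcases List.mem_append.1 hc with h | h
      · exact ih _ (Nat.div_lt_self (Nat.succ_pos n) (by omega)) c h
      · simp at h; subst h; split <;> simp

theorem mem_pyBinNat (m : Nat) : ∀ c ∈ pyBinNat m, c = '0' ∨ c = '1' := by
  unfold pyBinNat
  split
  · simp
  · exact mem_binChars m

-- fmtBin i width: i in binary, MSB first, left-padded with '0' to width (via Python's bin digits)
def fmtBin (i : Nat) (width : Nat) : List Char :=
  let s := pyBinNat i
  List.replicate (width - s.length) '0' ++ s

-- the row bits: A's int list rendered with str equals the fixed-width char list rendered as strings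
theorem bits_eq (i : Int) (symbols : List String) :
    (convert_single_term i symbols).map PySem.Int.toStr
      = (fmtBin i.toNat symbols.length).map (fun c => String.ofList [c]) := by
  have hdig : ∀ c ∈ pyBinNat i.toNat,
      PySem.Int.toStr ((c.toNat : Int) - 48) = String.ofList [c] := by
    intro c hc
    rcases mem_pyBinNat _ c hc with h | h <;> subst h <;> rfl
  unfold convert_single_term fmtBin
  simp only [List.length_map]
  split
  · rw [List.map_append, List.map_append, List.map_replicate, List.map_replicate]
    congr 1
    rw [List.map_map]
    exact List.map_congr_left (fun c hc => hdig c hc)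
  · rename_i h
    have h0 : symbols.length - (pyBinNat i.toNat).length = 0 := by omega
    rw [h0]
    simp only [List.replicate_zero, List.nil_append]
    rw [List.map_map]
    exact List.map_congr_left (fun c hc => hdig c hc)

-- binChars with raw binChars padding (empty for 0), the shape rowsB produces
def padChars (r : Nat) (i : Nat) : List Char :=
  List.replicate (r - (binChars i).length) '0' ++ binChars i

theorem binChars_step (j : Nat) (h : j ≠ 0) :
    binChars j = binChars (j/2) ++ [if j % 2 = 1 then '1' else '0'] := by
  match j, h with
  | n+1, _ => rw [binChars]

theorem len_binChars_le : ∀ (r : Nat) (j : Nat), j < 2^r → (binChars j).length ≤ r := by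
  intro r
  induction r with
  | zero => intro j hj; interval_cases j; simp [binChars]
  | succ r ih =>
    intro j hj
    rcases Nat.eq_zero_or_pos j with h0 | h0
    · subst h0; simp [binChars]
    · rw [binChars_step j (by omega), List.length_append]
      have : j / 2 < 2^r := by omega
      have := ih _ this
      simp; omega

theorem len_padChars (r j : Nat) (h : j < 2^r) : (padChars r j).length = r := by
  unfold padChars
  have := len_binChars_le r j h
  simp [List.length_replicate]; omega

theorem padStep (r i : Nat) :
    padChars (r+1) i = padChars r (i/2) ++ [if i % 2 = 1 then '1' else '0'] := by
  rcases Nat.eq_zero_or_pos i with h0 | h0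
  · subst h0
    simp [padChars, binChars, List.replicate_succ']
  · unfold padChars
    rw [binChars_step i (by omega)]
    simp only [List.length_append, List.length_cons, List.length_nil]
    have : r + 1 - ((binChars (i/2)).length + (0 + 1)) = r - (binChars (i/2)).length := by omega
    rw [this, List.append_assoc]

theorem binChars_top : ∀ (r j : Nat), 2^r ≤ j → j < 2^(r+1) →
    binChars j = '1' :: padChars r (j - 2^r) := by
  intro r
  induction r with
  | zero =>
    intro j h1 h2
    interval_cases j
    rw [binChars_step 1 (by omega)]
    simp [padChars, binChars]
  | succ r ih =>
    intro j h1 h2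
    have e1 : (2:Nat)^(r+1) = 2^r + 2^r := by ring
    have e2 : (2:Nat)^(r+1+1) = 2^(r+1) + 2^(r+1) := by ring
    have hd1 : 2^r ≤ j / 2 := by omega
    have hd2 : j / 2 < 2^(r+1) := by omega
    rw [binChars_step j (by omega), ih _ hd1 hd2, padStep]
    have hdiv : j / 2 - 2^r = (j - 2^(r+1)) / 2 := by omega
    have hmod : j % 2 = (j - 2^(r+1)) % 2 := by omega
    rw [hdiv, hmod]
    simp

theorem padHead (r j : Nat) (h : j < 2^(r+1)) :
    padChars (r+1) j = (if j < 2^r then '0' else '1') :: padChars r (j % 2^r) := by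
  have hp : (0:Nat) < 2^r := Nat.two_pow_pos r
  by_cases hlt : j < 2^r
  · have hmod : j % 2^r = j := Nat.mod_eq_of_lt hlt
    have hL : (binChars j).length ≤ r := len_binChars_le r j hlt
    simp only [hlt, if_pos, hmod]
    unfold padChars
    have : r + 1 - (binChars j).length = (r - (binChars j).length) + 1 := by omega
    rw [this, List.replicate_succ]
    rfl
  · have e1 : (2:Nat)^(r+1) = 2^r + 2^r := by ring
    have h1 : 2^r ≤ j := by omega
    have hmod : j % 2^r = j - 2^r := by
      rw [Nat.mod_eq_sub_mod h1, Nat.mod_eq_of_lt (by omega)]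
    have htop := binChars_top r j h1 (by omega)
    have hlen : (binChars j).length = r + 1 := by
      rw [htop]
      simp [len_padChars r (j - 2^r) (by omega)]
    simp only [if_neg hlt, hmod]
    unfold padChars
    rw [hlen, Nat.sub_self, List.replicate_zero, List.nil_append, htop]
    rfl

theorem fmt_eq_pad (m j : Nat) (hm : 1 ≤ m) : fmtBin j m = padChars m j := by
  rcases Nat.eq_zero_or_pos j with h0 | h0
  · subst h0
    unfold fmtBin padChars pyBinNat
    simp [binChars]
    match m, hm with
    | r+1, _ => rw [List.replicate_succ']; rfl
  · unfold fmtBin padChars pyBinNat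
    rw [if_neg (by omega)]

-- a foldl that only appends singletons is the initial list plus a map
theorem foldl_app {α β : Type} (l : List α) (f : α → β) :
    ∀ (init : List β), l.foldl (fun acc i => acc ++ [f i]) init = init ++ l.map f := by
  induction l with
  | nil => simp
  | cons x xs ih => intro init; simp [ih]

-- the recursive row generator, characterised as a map over the index range
theorem rowsB_eq (c : String) (value : PySem.Dict Int String) :
    ∀ (r : Nat) (bits : List String) (k : Int),
    rowsB c value bits k r = (List.range (2^r)).map (fun j =>
      c ++ " " ++ PySem.Str.join " | "
        (bits ++ (padChars r j).map (fun ch => String.ofList [ch]) ++ [value.getD (k * 2^r + (j:Int)) "0"])) := by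
  intro r
  induction r with
  | zero =>
    intro bits k
    simp [rowsB, padChars, binChars]
  | succ r ih =>
    intro bits k
    have hsplit : (2:Nat)^(r+1) = 2^r + 2^r := by ring
    rw [rowsB, ih, ih, hsplit, List.range_add, List.map_append, List.map_map]
    congr 1
    · apply List.map_congr_left
      intro j hj
      have hj' : j < 2^r := List.mem_range.1 hj
      rw [padHead r j (by omega), Nat.mod_eq_of_lt hj']
      simp only [if_pos hj', List.map_cons]
      have hidx : (2*k) * (2:Int)^r + (j:Int) = k * 2^(r+1) + (j:Int) := by ring
      rw [hidx, List.append_assoc, show String.ofList ['0'] = "0" from rfl]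
      simp
    · apply List.map_congr_left
      intro j hj
      have hj' : j < 2^r := List.mem_range.1 hj
      simp only [Function.comp]
      have h1 : ¬ (2^r + j < 2^r) := by omega
      rw [padHead r (2^r + j) (by omega)]
      rw [if_neg h1]
      have hmod : (2^r + j) % 2^r = j := by
        rw [Nat.add_mod_left, Nat.mod_eq_of_lt hj']
      rw [hmod]
      simp only [List.map_cons]
      have hidx : (2*k+1) * (2:Int)^r + (j:Int) = k * 2^(r+1) + ((2^r + j : Nat) : Int) := by
        push_cast; ring
      rw [hidx, List.append_assoc, show String.ofList ['1'] = "1" from rfl]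
      simp

-- ===== VERDICT (by name: the statement is the Claim_ definition above) =====
theorem print_table_minterms_spec : Claim_unchanged_print_table_minterms := by
  intro terms no_care symbols ncs comment _
  intro hD
  unfold D_print_table_minterms at hD
  have hn : 1 ≤ symbols.length := by
    cases symbols with
    | nil => exact absurd rfl hD
    | cons a l => simp
  unfold print_table_minterms print_table_minterms_alt format_line
  set c := if comment then "//" else "" with hc
  set value : PySem.Dict Int String :=
    terms.foldl (fun d t => d.insert t "1")
      (no_care.foldl (fun d t => d.insert t ncs) PySem.Dict.empty) with hv
  have hcell : ∀ i : Int, value.getD i "0" = if i ∈ terms then "1" else if i ∈ no_care then ncs else "0" := by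
    intro i
    rw [hv, getD_foldl_insert_const, getD_foldl_insert_const]
    simp [PySem.Dict.getD, PySem.Dict.get?, PySem.Dict.empty]
  -- A side: the fold appends one line per index
  have hfun : (fun (acc : List String) (i : Int) =>
      if i ∈ terms then
        acc ++ [c ++ " " ++ PySem.Str.join " | " ((convert_single_term i symbols).map PySem.Int.toStr ++ ["1"])]
      else if i ∈ no_care then
        acc ++ [c ++ " " ++ PySem.Str.join " | " ((convert_single_term i symbols).map PySem.Int.toStr ++ [ncs])]
      else
        acc ++ [c ++ " " ++ PySem.Str.join " | " ((convert_single_term i symbols).map PySem.Int.toStr ++ ["0"])])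
      = (fun (acc : List String) (i : Int) =>
        acc ++ [c ++ " " ++ PySem.Str.join " | " ((convert_single_term i symbols).map PySem.Int.toStr ++ [value.getD i "0"])]) := by
    funext acc i
    rw [hcell i]
    split_ifs <;> rfl
  -- pyRange → List.range of Nats
  have hr : PySem.List.pyRange 0 ((2:Int)^symbols.length) 1
      = List.map (fun k : Nat => (k : Int)) (List.range (2^symbols.length)) := by
    rw [PySem.List.pyRange_one]
    have h2 : (((2:Int)^symbols.length) - 0).toNat = 2^symbols.length := by
      rw [Int.sub_zero, show ((2:Int)^symbols.length) = ((2^symbols.length : Nat) : Int) by push_cast; ring,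
        Int.toNat_natCast]
    rw [h2]
    apply List.map_congr_left
    intro k _
    simp
  simp only [hfun, foldl_app, rowsB_eq, hr, List.map_map]
  congr 2
  apply List.map_congr_left
  intro j hj
  have hj' : j < 2^symbols.length := List.mem_range.1 hj
  simp only [Function.comp]
  rw [bits_eq, Int.toNat_natCast, fmt_eq_pad _ _ hn]
  simp

theorem print_table_minterms_changed : Claim_changed_print_table_minterms := by
  unfold Claim_changed_print_table_minterms; decide

theorem print_table_minterms_tight : Claim_exact_print_table_minterms := by
  intro terms no_care symbols ncs comment _ hD
  unfold D_print_table_minterms at hD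
  subst hD
  set c := if comment then "//" else "" with hc
  have hcell : (terms.foldl (fun d t => d.insert t "1")
      (no_care.foldl (fun d t => d.insert t ncs) PySem.Dict.empty)).getD 0 "0"
      = if (0:Int) ∈ terms then "1" else if (0:Int) ∈ no_care then ncs else "0" := by
    rw [getD_foldl_insert_const, getD_foldl_insert_const]
    simp [PySem.Dict.getD, PySem.Dict.get?, PySem.Dict.empty]
  set s := if (0:Int) ∈ terms then "1" else if (0:Int) ∈ no_care then ncs else "0" with hs
  have hA : print_table_minterms terms no_care [] ncs comment
      = PySem.Str.join "\n" [c ++ " " ++ PySem.Str.join " | " ["f"],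
          c ++ " " ++ PySem.Str.join " | " ["0", s]] := by
    unfold print_table_minterms format_line
    simp only [List.length_nil, pow_zero, List.nil_append]
    rw [show PySem.List.pyRange 0 (1:Int) 1 = [0] from by decide]
    have hconv : (convert_single_term 0 []).map PySem.Int.toStr = ["0"] := rfl
    simp only [List.foldl_cons, List.foldl_nil, hconv]
    split_ifs <;> simp_all
  have hB : print_table_minterms_alt terms no_care [] ncs comment
      = PySem.Str.join "\n" [c ++ " " ++ PySem.Str.join " | " ["f"],
          c ++ " " ++ PySem.Str.join " | " [s]] := by
    unfold print_table_minterms_alt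
    simp only [List.length_nil, rowsB, List.nil_append, List.cons_append]
    rw [hcell]
  rw [hA, hB]
  intro heq
  have hlen := congrArg (fun t : String => t.toList.length) heq
  simp [PySem.Str.toList_join, PySem.Chars.join_cons_cons, PySem.Chars.join_singleton] at hlen
  omega
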